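-- pv_equiv track=rewrite | github.com/Binodsubedi/laboo | lab3/multiplesum.py | summul
-- ===== SOURCE A (Python) =====
-- process = True
--
-- def summul(number):
--     num_3 = 0
--     num_5 = 0
--     summ = 0;
--     while process == True:
--         num_3 += 1
--         num_5 += 1
--         num3mul = num_3 *3
--         num5mul = num_5 *5
--         num3diff = number - num3mul
--         num5diff = number - num5mul
--         if num3mul<=number and num5mul<=number:
--             if num3mul== num5mul:
--                 summ += num3mul
--             else:
--                 summ += num3mul + num5mul
--         elif num3mul<=number and num5diff<5:
--             summ += num3mul
--         elif num3diff<3 and num5diff<5: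
--             break
--
--
--     return summ
-- ===== SOURCE B (Python) =====
-- def summul(number):
--     if number < 3:
--         return 0
--     k3 = number // 3
--     k5 = number // 5
--     return 3 * k3 * (k3 + 1) // 2 + 5 * k5 * (k5 + 1) // 2
-- ===== Notes on version B (the rewrite author's own statement) =====
-- stated objective: faster
-- what changed: Replaced the linear counting loop by a closed-form Gauss arithmetic-series formula over the two multiple counts, reproducing A's double-counting of common multiples exactly.
import Mathlib
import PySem

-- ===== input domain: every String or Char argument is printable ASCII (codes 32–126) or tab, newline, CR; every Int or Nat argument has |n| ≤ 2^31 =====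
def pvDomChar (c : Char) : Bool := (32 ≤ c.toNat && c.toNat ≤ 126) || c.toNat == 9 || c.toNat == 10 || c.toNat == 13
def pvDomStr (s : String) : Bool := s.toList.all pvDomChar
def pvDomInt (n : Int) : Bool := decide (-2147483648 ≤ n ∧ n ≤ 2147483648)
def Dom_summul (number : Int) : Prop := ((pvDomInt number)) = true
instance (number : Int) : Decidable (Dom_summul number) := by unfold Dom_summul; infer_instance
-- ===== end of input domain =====

-- B replaces A's O(n) counting loop by the closed-form arithmetic-series formula (faster: asymptotic).

-- ===== PORT A =====
-- the while-True loop of A: n3, n5 are num_3, num_5; summ is the accumulator.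
-- fuel only makes the recursion structural; number.toNat + 1 steps always suffice (the loop
-- breaks at the first k with 3*(k+1) > number), so the fuel branch is never the result.
def summulGo : Nat → Int → Int → Int → Int → Int
  | 0, _, _, _, summ => summ
  | fuel + 1, number, n3, n5, summ =>
    let n3' := n3 + 1
    let n5' := n5 + 1
    let num3mul := n3' * 3
    let num5mul := n5' * 5
    let num3diff := number - num3mul
    let num5diff := number - num5mul
    if num3mul ≤ number ∧ num5mul ≤ number then
      if num3mul = num5mul then summulGo fuel number n3' n5' (summ + num3mul)
      else summulGo fuel number n3' n5' (summ + num3mul + num5mul)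
    else if num3mul ≤ number ∧ num5diff < 5 then
      summulGo fuel number n3' n5' (summ + num3mul)
    else if num3diff < 3 ∧ num5diff < 5 then summ
    else summulGo fuel number n3' n5' summ

def summul (number : Int) : Int := summulGo (number.toNat + 1) number 0 0 0

-- ===== PORT B =====
def summul_alt (number : Int) : Int :=
  if number < 3 then 0
  else
    let k3 := PySem.Int.floordiv number 3
    let k5 := PySem.Int.floordiv number 5
    PySem.Int.floordiv (3 * k3 * (k3 + 1)) 2 + PySem.Int.floordiv (5 * k5 * (k5 + 1)) 2

-- ===== PRECONDITION & SPEC =====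
def Spec_summul (number : Int) (out : Int) : Prop := out = summul_alt number
instance (number : Int) (out : Int) : Decidable (Spec_summul number out) := by unfold Spec_summul; infer_instance

-- ===== CLAIM (what is proved, stated in full; the proofs are below) =====
def Claim_equal_summul : Prop := ∀ (number : Int), Dom_summul number → Spec_summul number (summul number)

-- ===== LEMMAS AND PROOFS =====

-- triangular numbers 1 + 2 + ... + m
def trisum : Nat → Int
  | 0 => 0
  | m + 1 => trisum m + (m + 1)

lemma trisum_two (m : Nat) : 2 * trisum m = (m : Int) * (m + 1) := by
  induction m with
  | zero => simp [trisum]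
  | succ m ih =>
    have : trisum (m + 1) = trisum m + (m + 1) := rfl
    rw [this]
    push_cast
    push_cast at ih
    nlinarith

lemma go_eq (n : Int) (hn : 3 ≤ n) :
    ∀ (d k : Nat) (s : Int) (fuel : Nat), n.toNat / 3 - k = d → d < fuel →
      summulGo fuel n k k s
        = s + 3 * (trisum (n.toNat / 3) - trisum (min (n.toNat / 3) k))
            + 5 * (trisum (n.toNat / 5) - trisum (min (n.toNat / 5) k)) := by
  intro d
  induction d with
  | zero =>
    intro k s fuel hd hf
    obtain ⟨f, rfl⟩ : ∃ f, fuel = f + 1 := ⟨fuel - 1, by omega⟩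
    rw [summulGo]
    have h1 : ¬ (((k : Int) + 1) * 3 ≤ n ∧ ((k : Int) + 1) * 5 ≤ n) := by omega
    have h2 : ¬ (((k : Int) + 1) * 3 ≤ n ∧ n - ((k : Int) + 1) * 5 < 5) := by omega
    have h3 : n - ((k : Int) + 1) * 3 < 3 ∧ n - ((k : Int) + 1) * 5 < 5 := by omega
    simp only [if_neg h1, if_neg h2, if_pos h3]
    have hm3 : min (n.toNat / 3) k = n.toNat / 3 := by omega
    have hm5 : min (n.toNat / 5) k = n.toNat / 5 := by omega
    rw [hm3, hm5]; ring
  | succ d ih =>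
    intro k s fuel hd hf
    obtain ⟨f, rfl⟩ : ∃ f, fuel = f + 1 := ⟨fuel - 1, by omega⟩
    have hk3 : k < n.toNat / 3 := by omega
    have hle3 : ((k : Int) + 1) * 3 ≤ n := by omega
    rw [summulGo]
    by_cases h5 : ((k : Int) + 1) * 5 ≤ n
    · have hk5 : k < n.toNat / 5 := by omega
      have h1 : (((k : Int) + 1) * 3 ≤ n ∧ ((k : Int) + 1) * 5 ≤ n) := ⟨hle3, h5⟩
      have hne : ¬ (((k : Int) + 1) * 3 = ((k : Int) + 1) * 5) := by omega
      simp only [if_pos h1, if_neg hne]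
      have hcast : (k : Int) + 1 = ((k + 1 : Nat) : Int) := by push_cast; ring
      rw [hcast, ih (k + 1) _ f (by omega) (by omega)]
      have hm3 : min (n.toNat / 3) (k + 1) = k + 1 := by omega
      have hm5 : min (n.toNat / 5) (k + 1) = k + 1 := by omega
      have hm3' : min (n.toNat / 3) k = k := by omega
      have hm5' : min (n.toNat / 5) k = k := by omega
      rw [hm3, hm5, hm3', hm5']
      have ht : trisum (k + 1) = trisum k + (k + 1) := rfl
      rw [ht]; push_cast; ring
    · have hk5 : n.toNat / 5 ≤ k := by omega
      have h1 : ¬ (((k : Int) + 1) * 3 ≤ n ∧ ((k : Int) + 1) * 5 ≤ n) := by omega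
      have h2 : (((k : Int) + 1) * 3 ≤ n ∧ n - ((k : Int) + 1) * 5 < 5) := by omega
      simp only [if_neg h1, if_pos h2]
      have hcast : (k : Int) + 1 = ((k + 1 : Nat) : Int) := by push_cast; ring
      rw [hcast, ih (k + 1) _ f (by omega) (by omega)]
      have hm3 : min (n.toNat / 3) (k + 1) = k + 1 := by omega
      have hm5 : min (n.toNat / 5) (k + 1) = n.toNat / 5 := by omega
      have hm3' : min (n.toNat / 3) k = k := by omega
      have hm5' : min (n.toNat / 5) k = n.toNat / 5 := by omega
      rw [hm3, hm5, hm3', hm5']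
      have ht : trisum (k + 1) = trisum k + (k + 1) := rfl
      rw [ht]; push_cast; ring

lemma fdiv_tri (c : Nat) (m : Nat) :
    PySem.Int.floordiv ((c : Int) * (m : Int) * ((m : Int) + 1)) 2 = (c : Int) * trisum m := by
  have h2 : (c : Int) * (m : Int) * ((m : Int) + 1) = 2 * ((c : Int) * trisum m) := by
    have := trisum_two m
    nlinarith
  rw [h2, PySem.Int.floordiv_eq_ediv_of_pos (by norm_num)]
  omega

-- ===== VERDICT (by name: the statement is the Claim_ definition above) =====
theorem summul_spec : Claim_equal_summul := by
  intro n _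
  unfold Spec_summul summul summul_alt
  by_cases hn : n < 3
  · rw [summulGo]
    have h1 : ¬ (((0 : Int) + 1) * 3 ≤ n ∧ ((0 : Int) + 1) * 5 ≤ n) := by omega
    have h2 : ¬ (((0 : Int) + 1) * 3 ≤ n ∧ n - ((0 : Int) + 1) * 5 < 5) := by omega
    have h3 : n - ((0 : Int) + 1) * 3 < 3 ∧ n - ((0 : Int) + 1) * 5 < 5 := by omega
    simp only [if_neg h1, if_neg h2, if_pos h3, if_pos hn]
  · have hn' : 3 ≤ n := by omega
    have h0 : summulGo (n.toNat + 1) n ((0 : Nat) : Int) ((0 : Nat) : Int) 0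
        = 0 + 3 * (trisum (n.toNat / 3) - trisum (min (n.toNat / 3) 0))
            + 5 * (trisum (n.toNat / 5) - trisum (min (n.toNat / 5) 0)) :=
      go_eq n hn' (n.toNat / 3) 0 0 (n.toNat + 1) rfl (by omega)
    simp only [Nat.cast_zero, min_zero] at h0
    rw [h0, if_neg hn]
    have hk3 : PySem.Int.floordiv n 3 = ((n.toNat / 3 : Nat) : Int) := by
      rw [PySem.Int.floordiv_eq_ediv_of_pos (by norm_num)]; omega
    have hk5 : PySem.Int.floordiv n 5 = ((n.toNat / 5 : Nat) : Int) := by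
      rw [PySem.Int.floordiv_eq_ediv_of_pos (by norm_num)]; omega
    simp only [hk3, hk5]
    rw [show ((3:Int)) = ((3:Nat):Int) by norm_num] -- align casts for fdiv_tri
    rw [fdiv_tri 3 (n.toNat / 3)]
    rw [show ((5:Int)) = ((5:Nat):Int) by norm_num]
    rw [fdiv_tri 5 (n.toNat / 5)]
    simp [trisum]
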